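-- pv_equiv track=rewrite | github.com/myleveliszero/leetcode | 2023/Basics/CheckIfTwoStringArraysAreEquivalent_1662.py | version2
-- ===== SOURCE A (Python) =====
-- def version2(word1, word2):
--     s1 = ""
--     for char in word1:
--         s1 += char
--     s2 = ""
--     for char in word2:
--         s2 += char
--     slen1 = len(s1)
--     slen2 = len(s2)
--     if slen1 != slen2: return False
--
--     for i in range(slen1):
--         if s1[i] != s2[i]:
--             return False
--     return True
-- ===== SOURCE B (Python) =====
-- def version2(word1, word2):
--     it1 = (c for w in word1 for c in w)
--     it2 = (c for w in word2 for c in w)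
--     while True:
--         a = next(it1, None)
--         b = next(it2, None)
--         if a != b:
--             return False
--         if a is None:
--             return True
-- ===== Notes on version B (the rewrite author's own statement) =====
-- stated objective: alternative
-- what changed: B streams the characters of both arrays lazily in lockstep with generators and a None sentinel, returning on the first mismatch, instead of materialising both concatenated strings, comparing lengths, then comparing by index.
import Mathlib
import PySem

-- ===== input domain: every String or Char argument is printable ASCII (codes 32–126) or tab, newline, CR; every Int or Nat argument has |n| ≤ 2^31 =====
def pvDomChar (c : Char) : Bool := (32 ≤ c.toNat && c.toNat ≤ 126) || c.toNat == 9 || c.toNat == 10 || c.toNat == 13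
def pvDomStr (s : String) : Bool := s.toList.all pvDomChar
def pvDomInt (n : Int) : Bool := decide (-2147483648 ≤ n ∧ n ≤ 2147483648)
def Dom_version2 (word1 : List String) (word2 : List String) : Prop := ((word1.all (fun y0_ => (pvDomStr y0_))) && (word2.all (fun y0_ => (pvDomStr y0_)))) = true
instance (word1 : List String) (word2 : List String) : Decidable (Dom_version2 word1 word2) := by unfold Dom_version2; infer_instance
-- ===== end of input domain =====

-- B streams both arrays character-by-character in lockstep (sentinel for exhaustion) instead of building the concatenated strings; alternative decomposition, same cost.


-- ===== PORT A =====
-- A: concatenate word1 and word2 into strings (as char lists under PySem), compare lengths,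
-- then compare character by character over range(len).
def pvIdxLoop (s1 s2 : List Char) : List Nat → Bool
  | [] => true
  | i :: is => if s1.getD i ' ' ≠ s2.getD i ' ' then false else pvIdxLoop s1 s2 is

def version2 (word1 : List String) (word2 : List String) : Bool :=
  let s1 := word1.foldl (fun acc w => acc ++ w.toList) []
  let s2 := word2.foldl (fun acc w => acc ++ w.toList) []
  if s1.length ≠ s2.length then false
  else pvIdxLoop s1 s2 (List.range s1.length)

-- ===== PORT B =====
-- B: fused lockstep walk over the two character streams; none is the sentinel for exhaustion.
def pvLockstep : List Char → List Char → Bool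
  | [], [] => true
  | a :: as, b :: bs => if a ≠ b then false else pvLockstep as bs
  | _, _ => false

def version2_alt (word1 : List String) (word2 : List String) : Bool :=
  pvLockstep (word1.flatMap String.toList) (word2.flatMap String.toList)

-- ===== PRECONDITION & SPEC =====
def Spec_version2 (word1 : List String) (word2 : List String) (out : Bool) : Prop := out = version2_alt word1 word2
instance (word1 : List String) (word2 : List String) (out : Bool) : Decidable (Spec_version2 word1 word2 out) := by unfold Spec_version2; infer_instance

-- ===== CLAIM (what is proved, stated in full; the proofs are below) =====
def Claim_equal_version2 : Prop := ∀ (word1 : List String) (word2 : List String), Dom_version2 word1 word2 → Spec_version2 word1 word2 (version2 word1 word2)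

-- ===== LEMMAS AND PROOFS =====

-- ===== VERDICT (by name: the statement is the Claim_ definition above) =====
lemma pvIdxLoop_eq_all (s1 s2 : List Char) (is : List Nat) :
    pvIdxLoop s1 s2 is = is.all (fun i => decide (s1.getD i ' ' = s2.getD i ' ')) := by
  induction is with
  | nil => rfl
  | cons i is ih =>
    by_cases h : s1.getD i ' ' = s2.getD i ' ' <;> simp [pvIdxLoop, ih]

lemma pvLockstep_eq_beq (xs ys : List Char) : pvLockstep xs ys = (xs == ys) := by
  induction xs generalizing ys with
  | nil => cases ys <;> rfl
  | cons a as ih =>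
    cases ys with
    | nil => rfl
    | cons b bs =>
      by_cases h : a = b <;> simp [pvLockstep, h, ih]

lemma pvFoldl_eq_flatMap (ws : List String) (acc : List Char) :
    ws.foldl (fun acc w => acc ++ w.toList) acc = acc ++ ws.flatMap String.toList := by
  induction ws generalizing acc with
  | nil => simp
  | cons w ws ih => simp [List.foldl_cons, ih]

theorem version2_spec : Claim_equal_version2 := by
  intro word1 word2 _
  unfold Spec_version2 version2 version2_alt
  rw [pvFoldl_eq_flatMap, pvFoldl_eq_flatMap, pvLockstep_eq_beq]
  simp only [List.nil_append]
  set l1 := word1.flatMap String.toList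
  set l2 := word2.flatMap String.toList
  by_cases hlen : l1.length = l2.length
  · rw [if_neg (by simp [hlen])]
    rw [pvIdxLoop_eq_all]
    by_cases heq : l1 = l2
    · simp [heq]
    · simp only [beq_eq_false_iff_ne.mpr heq]
      rw [List.all_eq_false]
      have : ¬ (∀ i < l1.length, l1.getD i ' ' = l2.getD i ' ') := by
        intro hall
        apply heq
        apply List.ext_getElem hlen
        intro i h1 h2
        have := hall i h1
        rwa [List.getD_eq_getElem _ _ h1, List.getD_eq_getElem _ _ h2] at this
      push Not at this
      obtain ⟨i, hi, hne⟩ := this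
      exact ⟨i, List.mem_range.mpr hi, by simpa [List.getD] using hne⟩
  · have : l1 ≠ l2 := fun h => hlen (by rw [h])
    simp [hlen, beq_eq_false_iff_ne.mpr this]
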